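-- pv_equiv track=rewrite | github.com/anirudhsoni/dsa_leetcode | 3595-rearrange-k-substrings-to-form-target-string/rearrange-k-substrings-to-form-target-string.py | isPossibleToRearrange
-- ===== SOURCE A (Python) =====
-- def isPossibleToRearrange(s: str, t: str, k: int) -> bool:
--     subs={}
--     ln=len(s)//k
--     for i in range(0,len(s),ln):
--         subs[tuple(s[i:i+ln])]=subs.get(tuple(s[i:i+ln]),0)+1
--     for i in range(0,len(s),ln):
--         if tuple(t[i:i+ln]) not in subs or subs[tuple(t[i:i+ln])]==0:
--             return False
--         else:
--             subs[tuple(t[i:i+ln])]-=1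
--     return True
-- ===== SOURCE B (Python) =====
-- def isPossibleToRearrange(s: str, t: str, k: int) -> bool:
--     ln = len(s) // k
--     idx = range(0, len(s), ln)
--     return sorted(s[i:i+ln] for i in idx) == sorted(t[i:i+ln] for i in idx)
-- ===== Notes on version B (the rewrite author's own statement) =====
-- stated objective: alternative
-- what changed: Replaces A's hash-counter build-then-decrement-with-early-return scheme by sort-and-compare: collect the fixed-size chunks of s and of t, sort each list lexicographically and compare once (multiset equality via sorting instead of hashing).
import Mathlib
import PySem

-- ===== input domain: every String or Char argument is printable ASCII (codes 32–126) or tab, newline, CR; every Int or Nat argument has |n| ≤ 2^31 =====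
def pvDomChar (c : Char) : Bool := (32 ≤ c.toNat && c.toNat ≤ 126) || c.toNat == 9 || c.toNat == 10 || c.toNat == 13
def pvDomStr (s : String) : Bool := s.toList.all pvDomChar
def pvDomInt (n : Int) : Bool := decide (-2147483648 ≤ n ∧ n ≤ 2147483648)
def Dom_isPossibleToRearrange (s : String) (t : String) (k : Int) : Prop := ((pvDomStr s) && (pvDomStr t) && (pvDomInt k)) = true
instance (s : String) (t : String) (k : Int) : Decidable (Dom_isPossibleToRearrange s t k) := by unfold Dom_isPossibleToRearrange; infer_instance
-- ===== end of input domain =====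

-- B replaces A's hash-counter build-then-decrement-with-early-return scheme by sort-and-compare:
-- sort the chunk lists of s and t lexicographically and compare once (alternative algorithm).

-- ===== PORT A =====
-- second Python loop with its early 'return False': structural recursion over the index list
def pvLoopA (tl : List Char) (ln : Int) (idxs : List Int) (subs : PySem.Dict (List Char) Int) : Bool :=
  match idxs with
  | [] => true
  | i :: rest =>
    let key := PySem.List.slice tl (some i) (some (i + ln))
    if !(subs.contains key) || (subs.getD key 0 == 0) then false
    else pvLoopA tl ln rest (subs.insert key (subs.getD key 0 - 1))

def isPossibleToRearrange (s : String) (t : String) (k : Int) : Bool :=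
  let sl := s.toList
  let ln := PySem.Int.floordiv (PySem.Str.len s) k
  let subs := (PySem.List.pyRange 0 (PySem.Str.len s) ln).foldl
    (fun d i => d.insert (PySem.List.slice sl (some i) (some (i + ln)))
                  (d.getD (PySem.List.slice sl (some i) (some (i + ln))) 0 + 1))
    PySem.Dict.empty
  pvLoopA t.toList ln (PySem.List.pyRange 0 (PySem.Str.len s) ln) subs

-- ===== PORT B =====
def isPossibleToRearrange_alt (s : String) (t : String) (k : Int) : Bool :=
  let ln := PySem.Int.floordiv (PySem.Str.len s) k
  let idx := PySem.List.pyRange 0 (PySem.Str.len s) ln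
  PySem.List.sorted (idx.map (fun i => PySem.List.slice s.toList (some i) (some (i + ln)))) (fun x => x)
    == PySem.List.sorted (idx.map (fun i => PySem.List.slice t.toList (some i) (some (i + ln)))) (fun x => x)

-- ===== PRECONDITION & SPEC =====
-- Pre_ excludes exactly the inputs where the Python raises: k = 0 (ZeroDivisionError) and
-- len(s)//k = 0 (range step 0, ValueError); on both, B raises identically.
def Pre_isPossibleToRearrange (s : String) (t : String) (k : Int) : Prop :=
  k ≠ 0 ∧ PySem.Int.floordiv (PySem.Str.len s) k ≠ 0
instance (s : String) (t : String) (k : Int) : Decidable (Pre_isPossibleToRearrange s t k) := by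
  unfold Pre_isPossibleToRearrange; infer_instance

def pvWitness_isPossibleToRearrange : String × String × Int := ("abab", "baab", 2)

def Spec_isPossibleToRearrange (s : String) (t : String) (k : Int) (out : Bool) : Prop := out = isPossibleToRearrange_alt s t k
instance (s : String) (t : String) (k : Int) (out : Bool) : Decidable (Spec_isPossibleToRearrange s t k out) := by unfold Spec_isPossibleToRearrange; infer_instance

-- ===== CLAIM (what is proved, stated in full; the proofs are below) =====
def Claim_equal_isPossibleToRearrange : Prop := ∀ (s : String) (t : String) (k : Int), Dom_isPossibleToRearrange s t k → Pre_isPossibleToRearrange s t k → Spec_isPossibleToRearrange s t k (isPossibleToRearrange s t k)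

-- ===== LEMMAS AND PROOFS =====

-- A's second loop, rephrased over the list of t-chunks the indices denote
def pvLoopK (ks : List (List Char)) (d : PySem.Dict (List Char) Int) : Bool :=
  match ks with
  | [] => true
  | c :: rest =>
    if !(d.contains c) || (d.getD c 0 == 0) then false
    else pvLoopK rest (d.insert c (d.getD c 0 - 1))

theorem pvLoopA_eq_loopK (tl : List Char) (ln : Int) (idxs : List Int)
    (d : PySem.Dict (List Char) Int) :
    pvLoopA tl ln idxs d
      = pvLoopK (idxs.map (fun i => PySem.List.slice tl (some i) (some (i + ln)))) d := by
  induction idxs generalizing d with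
  | nil => rfl
  | cons i rest ih => simp only [pvLoopA, pvLoopK, List.map_cons]; split <;> simp [ih]

theorem pvCount_cons (c x : List Char) (rest : List (List Char)) :
    (c :: rest).count x = rest.count x + (if x = c then 1 else 0) := by
  rcases eq_or_ne x c with rfl | hxc
  · simp
  · simp [hxc, Ne.symm hxc]

theorem pvLoopK_iff (ks : List (List Char)) (d : PySem.Dict (List Char) Int)
    (h : ∀ x, 0 ≤ d.getD x 0) :
    pvLoopK ks d = true ↔ ∀ x, (ks.count x : Int) ≤ d.getD x 0 := by
  induction ks generalizing d with
  | nil =>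
    simp only [pvLoopK, List.count_nil, Nat.cast_zero, true_iff]
    exact fun x => h x
  | cons c rest ih =>
    by_cases hc : d.getD c 0 = 0
    · have hfail : pvLoopK (c :: rest) d = false := by
        cases hcon : d.contains c <;> simp [pvLoopK, hcon, hc]
      rw [hfail]
      constructor
      · intro habs; exact absurd habs (by simp)
      · intro hall
        have hx := hall c
        rw [pvCount_cons, hc] at hx
        simp at hx
        omega
    · have hcon : d.contains c = true := by
        cases hcon : d.contains c
        · exact absurd (PySem.Dict.getD_of_not_contains d 0 hcon) hc
        · rfl
      have hstep : pvLoopK (c :: rest) d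
          = pvLoopK rest (d.insert c (d.getD c 0 - 1)) := by
        simp [pvLoopK, hcon, hc]
      have h' : ∀ x, 0 ≤ (d.insert c (d.getD c 0 - 1)).getD x 0 := by
        intro x
        rw [PySem.Dict.getD_insert]
        split
        · have := lt_of_le_of_ne (h c) (Ne.symm hc); omega
        · exact h x
      rw [hstep, ih _ h']
      constructor
      · intro hall x
        have hx := hall x
        rw [PySem.Dict.getD_insert] at hx
        rw [pvCount_cons]
        by_cases hxc : x = c
        · subst hxc; rw [if_pos rfl] at hx ⊢; push_cast; omega
        · rw [if_neg hxc] at hx ⊢; push_cast; omega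
      · intro hall x
        have hx := hall x
        rw [pvCount_cons] at hx
        rw [PySem.Dict.getD_insert]
        by_cases hxc : x = c
        · subst hxc; rw [if_pos rfl] at hx ⊢; push_cast at hx; omega
        · rw [if_neg hxc] at hx ⊢; push_cast at hx; omega

-- List.count under the DecidableEq-derived BEq equals count under the default instance
theorem pvCount_inst (x : List Char) (l : List (List Char)) :
    @List.count (List Char) instBEqOfDecidableEq x l = @List.count (List Char) List.instBEq x l := by
  induction l with
  | nil => rfl
  | cons a l ih => simp [List.count_cons, ih]

-- PySem.List.sorted with the elaborator-chosen core List.instLT equals sorted with the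
-- LinearOrder instance the library lemmas are stated for (the comparators decide the same order)
theorem pvSortedInst (xs : List (List Char)) :
    @PySem.List.sorted (List Char) (List Char) List.instLT (fun a b => List.decidableLT a b) xs (fun x => x) false
      = @PySem.List.sorted (List Char) (List Char) List.instLinearOrder.toLT
          LinearOrder.toDecidableLT xs (fun x => x) false := by
  have hcmp : (fun a b : List Char => @decide (a < b) (List.decidableLT a b))
      = (fun a b : List Char =>
          @decide (@LT.lt _ List.instLinearOrder.toLT a b) (LinearOrder.toDecidableLT a b)) := by
    funext a b
    rw [decide_eq_decide]
  simp only [PySem.List.sorted, Bool.false_eq_true, if_false, hcmp]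

-- chunk lists of equal length: t-counts ≤ s-counts ⟺ they are permutations
theorem pvLeIffPerm (ls lt : List (List Char)) (hlen : ls.length = lt.length)
    (hle : ∀ x, lt.count x ≤ ls.count x) : ls.Perm lt := by
  have hms : (lt : Multiset (List Char)) ≤ (ls : Multiset (List Char)) := by
    rw [Multiset.le_iff_count]
    intro a
    rw [Multiset.coe_count, Multiset.coe_count, pvCount_inst, pvCount_inst]
    exact hle a
  have hcard : ((ls : Multiset (List Char))).card ≤ ((lt : Multiset (List Char))).card := by
    rw [Multiset.coe_card, Multiset.coe_card]
    exact hlen.le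
  exact (Multiset.coe_eq_coe.mp (Multiset.eq_of_le_of_card_le hms hcard)).symm

-- ===== VERDICT (by name: the statement is the Claim_ definition above) =====
theorem isPossibleToRearrange_spec : Claim_equal_isPossibleToRearrange := by
  intro s t k _ _
  unfold Spec_isPossibleToRearrange
  simp only [isPossibleToRearrange, isPossibleToRearrange_alt]
  generalize PySem.Int.floordiv (PySem.Str.len s) k = ln
  generalize PySem.List.pyRange 0 (PySem.Str.len s) ln = R
  rw [pvLoopA_eq_loopK]
  rw [← List.foldl_map (f := fun i : Int => PySem.List.slice s.toList (some i) (some (i + ln)))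
        (g := fun (d : PySem.Dict (List Char) Int) key => d.insert key (d.getD key 0 + 1)),
      PySem.Dict.foldl_insert_getD_add_one_eq_counter]
  rw [Bool.eq_iff_iff, beq_iff_eq, pvSortedInst, pvSortedInst,
      pvLoopK_iff _ _ (by intro x; rw [PySem.Dict.getD_counter]; positivity),
      PySem.List.sorted_id_eq_sorted_id_iff_perm]
  constructor
  · intro h
    refine pvLeIffPerm _ _ (by rw [List.length_map, List.length_map]) (fun x => ?_)
    have hx := h x
    rw [PySem.Dict.getD_counter] at hx
    exact_mod_cast hx
  · intro h x
    rw [PySem.Dict.getD_counter]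
    exact_mod_cast (h.count_eq x).ge
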